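-- pv_equiv track=rewrite | github.com/Kristen-B/CodeSignal | 15 Add_Border.py | solution
-- ===== SOURCE A (Python) =====
-- def solution(picture):
--
--     inside_width=len(picture[0])
--     inside_height=len(picture)
--
--     outside_height=inside_height+2
--     outside_width=inside_width+2
--
--     total=[]
--     s=[]
--     line=[]
--
--
--     for i in range(0,outside_height):
--
--         line=[]
--
--         for j in range(0,outside_width):
--
--             if (i==0 or i==outside_height-1 or j==0 or j==outside_width-1):
--                 line.append('*')
--
--             else:
--                 #return len(picture), inside_width
--                 line.append(picture[i-1][j-1])
--
--         word = ''.join(line)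
--         total.append(word)
--
--
--
--     result_4 = total[0].split()
--
--     return total
-- ===== SOURCE B (Python) =====
-- def solution(picture):
--     w = len(picture[0])
--     bar = '*' * (w + 2)
--     return [bar] + ['*' + row[:w] + '*' for row in picture] + [bar]
-- ===== Notes on version B (the rewrite author's own statement) =====
-- stated objective: simpler
-- what changed: Replaces A's nested index loops and per-cell four-way boundary test by assembling whole lines directly: one bar string plus '*'+row[:w]+'*' for each row.
import Mathlib
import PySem

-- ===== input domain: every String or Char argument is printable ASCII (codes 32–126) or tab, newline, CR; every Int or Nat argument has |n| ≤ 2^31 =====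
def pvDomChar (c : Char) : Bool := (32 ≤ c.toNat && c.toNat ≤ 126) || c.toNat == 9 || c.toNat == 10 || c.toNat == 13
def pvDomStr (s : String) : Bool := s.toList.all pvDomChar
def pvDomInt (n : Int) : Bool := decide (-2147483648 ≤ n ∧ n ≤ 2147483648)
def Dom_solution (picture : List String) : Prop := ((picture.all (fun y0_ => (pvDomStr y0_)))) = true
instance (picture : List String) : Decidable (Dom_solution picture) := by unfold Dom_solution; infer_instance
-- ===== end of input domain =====

-- B builds each output line as one whole string (top bar, '*'+row[:w]+'*' per row, bottom bar)
-- instead of A's nested index loops with a four-way boundary test per cell: a simpler decomposition.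

-- ===== PORT A =====
def solution (picture : List String) : List String :=
  let insideWidth : Int := PySem.Str.len ((PySem.List.pyGet? picture 0).getD "")
  let insideHeight : Int := PySem.List.len picture
  let outsideHeight : Int := insideHeight + 2
  let outsideWidth : Int := insideWidth + 2
  let total : List String :=
    (PySem.List.pyRange 0 outsideHeight).foldl (fun total i =>
      let line : List Char :=
        (PySem.List.pyRange 0 outsideWidth).foldl (fun line j =>
          if i = 0 ∨ i = outsideHeight - 1 ∨ j = 0 ∨ j = outsideWidth - 1 then
            line ++ ['*']
          else
            -- picture[i-1][j-1]; the IndexError case (none, defaulted here) is excluded by Pre_solution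
            line ++ [(PySem.Str.pyGet? ((PySem.List.pyGet? picture (i - 1)).getD "") (j - 1)).getD ' '])
          []
      -- word = ''.join(line): line is a list of single characters, so the join is String.ofList (exact)
      total ++ [String.ofList line]) []
  -- result_4 = total[0].split()  (computed and discarded by A; total is non-empty, so no raise)
  let _result_4 := PySem.Str.split₀ ((PySem.List.pyGet? total 0).getD "")
  total

-- ===== PORT B =====
def solution_alt (picture : List String) : List String :=
  let w : Int := PySem.Str.len ((PySem.List.pyGet? picture 0).getD "")
  -- bar = '*' * (w + 2)
  let bar : String := String.ofList (PySem.List.pyRepeat ['*'] (w + 2))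
  -- '*' + row[:w] + '*', built on the character lists (exact: string concatenation of the 1-char borders)
  [bar] ++ picture.map (fun row => String.ofList ('*' :: (PySem.Str.slice row none (some w)).toList ++ ['*'])) ++ [bar]

-- ===== PRECONDITION & SPEC =====
-- Pre_ is exactly where the Python A returns: a non-empty picture whose rows are all at least as long
-- as the first row (an empty picture, or any row shorter than the first, raises IndexError in A).
def Pre_solution (picture : List String) : Prop :=
  picture ≠ [] ∧ ∀ s ∈ picture, PySem.Str.len (picture.headD "") ≤ PySem.Str.len s
instance (picture : List String) : Decidable (Pre_solution picture) := by unfold Pre_solution; infer_instance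
def pvWitness_solution : List String := (["ab", "cd"])

def Spec_solution (picture : List String) (out : List String) : Prop := out = solution_alt picture
instance (picture : List String) (out : List String) : Decidable (Spec_solution picture out) := by unfold Spec_solution; infer_instance

-- ===== CLAIM (what is proved, stated in full; the proofs are below) =====
def Claim_equal_solution : Prop := ∀ (picture : List String), Dom_solution picture → Pre_solution picture → Spec_solution picture (solution picture)

-- ===== LEMMAS AND PROOFS =====

-- A's inner loop: append '*' or a computed character, depending on a test of the index alone
theorem foldl_ite_append {α β : Type} (l : List β) (C : β → Prop) [DecidablePred C] (a : α) (g : β → α) :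
    l.foldl (fun acc x => if C x then acc ++ [a] else acc ++ [g x]) ([] : List α)
      = l.map (fun x => if C x then a else g x) := by
  rw [PySem.List.foldl_congr_mem l _ (fun acc x => acc ++ [if C x then a else g x]) []
    (by intro acc x _; dsimp only; split <;> rfl)]
  simpa using PySem.List.foldl_append_singleton_eq_map (fun x => if C x then a else g x) l []

-- a prefix read element by element is List.take
theorem map_range_getD_eq_take {α : Type} (l : List α) (d : α) (k : Nat) (h : k ≤ l.length) :
    (List.range k).map (fun m => l[m]?.getD d) = l.take k := by
  apply List.ext_getElem
  · simp [Nat.min_eq_left h]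
  · intro i h1 h2
    have hi : i < k := by simpa using h1
    have hil : i < l.length := lt_of_lt_of_le hi h
    simp [List.getElem?_eq_getElem hil, List.getElem_take]

-- a line of A's grid on which the boundary test always fires is the bar
theorem star_line (w : Nat) (C : Int → Prop) [DecidablePred C] (g : Int → Char)
    (hC : ∀ j, C j) :
    (PySem.List.pyRange 0 ((w : Int) + 2)).map (fun j => if C j then '*' else g j)
      = PySem.List.pyRepeat ['*'] ((w : Int) + 2) := by
  rw [PySem.List.pyRange_one, PySem.List.pyRepeat_singleton, List.map_map]
  have h2 : (((w : Int) + 2) - 0).toNat = w + 2 := by omega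
  have h2' : ((w : Int) + 2).toNat = w + 2 := by omega
  rw [h2, h2']
  simp only [Function.comp_def, hC, if_true]
  simp [List.map_const']

-- a line of A's grid whose boundary test fires exactly at the two ends: border, row clipped to w, border
theorem mid_line (w : Nat) (row : String) (hrow : w ≤ row.toList.length)
    (C : Int → Prop) [DecidablePred C]
    (hC : ∀ j : Int, 0 ≤ j → j < (w : Int) + 2 → (C j ↔ (j = 0 ∨ j = (w : Int) + 2 - 1))) :
    (PySem.List.pyRange 0 ((w : Int) + 2)).map
        (fun j => if C j then '*' else (PySem.Str.pyGet? row (j - 1)).getD ' ')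
      = '*' :: row.toList.take w ++ ['*'] := by
  rw [PySem.List.pyRange_one, List.map_map]
  have h2 : (((w : Int) + 2) - 0).toNat = w + 2 := by omega
  rw [h2]
  have hsplit : List.range (w + 2) = 0 :: ((List.range w).map Nat.succ ++ [w + 1]) := by
    rw [show w + 2 = (w + 1) + 1 from rfl, List.range_succ, List.range_succ_eq_map]
    simp
  rw [hsplit]
  simp only [List.map_cons, List.map_append, List.map_map, List.map_nil, Function.comp_def]
  have c0 : C ((0 : Int) + (0 : Nat)) := by
    rw [hC _ (by omega) (by omega)]; left; omega
  rw [if_pos c0]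
  congr 1
  have hmid : (List.range w).map (fun k => if C (0 + ((k.succ : Nat) : Int)) then '*'
      else (PySem.Str.pyGet? row ((0 : Int) + ((k.succ : Nat) : Int) - 1)).getD ' ')
      = (List.range w).map (fun k => row.toList[k]?.getD ' ') := by
    apply List.map_congr_left
    intro k hk
    have hkw : k < w := List.mem_range.mp hk
    have hnc : ¬ C (0 + ((k.succ : Nat) : Int)) := by
      intro h
      have := (hC _ (by omega) (by push_cast; omega)).mp h
      omega
    rw [if_neg hnc]
    have : (0 : Int) + ((k.succ : Nat) : Int) - 1 = (k : Int) := by push_cast; omega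
    rw [this, PySem.Str.pyGet?_natCast]
  rw [hmid, map_range_getD_eq_take row.toList ' ' w hrow]
  congr 1
  have cl : C (0 + (((w + 1 : Nat)) : Int)) := by
    rw [hC _ (by omega) (by push_cast; omega)]; right; push_cast; omega
  rw [if_pos cl]

theorem main_equiv (r : String) (rest : List String)
    (hall : ∀ s ∈ r :: rest, PySem.Str.len ((r :: rest).headD "") ≤ PySem.Str.len s) :
    solution (r :: rest) = solution_alt (r :: rest) := by
  have hall' : ∀ s ∈ r :: rest, r.toList.length ≤ s.toList.length := by
    intro s hs
    have := hall s hs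
    simpa [PySem.Str.len_eq] using this
  unfold solution solution_alt
  simp only [PySem.List.pyGet?_zero_cons, Option.getD_some, PySem.Str.len_eq, PySem.List.len_eq,
    List.length_cons]
  rw [PySem.List.foldl_append_singleton_eq_map]
  rw [PySem.List.pyRange_one 0 (((rest.length + 1 : Nat) : Int) + 2), List.map_map]
  have hlen : ((((rest.length + 1 : Nat) : Int) + 2) - 0).toNat = rest.length + 3 := by omega
  rw [hlen]
  have hsplit : List.range (rest.length + 3) =
      0 :: ((List.range (rest.length + 1)).map Nat.succ ++ [rest.length + 2]) := by
    rw [show rest.length + 3 = (rest.length + 2) + 1 from rfl, List.range_succ,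
      List.range_succ_eq_map]
    simp
  rw [hsplit]
  simp only [List.map_cons, List.map_append, List.map_map, List.map_nil, Function.comp_def,
    List.nil_append]
  congr 1
  · -- top bar
    rw [foldl_ite_append _ (fun j => ((0:Int) + ((0:Nat):Int)) = 0 ∨ (0:Int) + ((0:Nat):Int) = ((rest.length + 1 : Nat) : Int) + 2 - 1 ∨ j = 0 ∨ j = (r.toList.length : Int) + 2 - 1)]
    rw [star_line r.toList.length (fun j => ((0:Int) + ((0:Nat):Int)) = 0 ∨ (0:Int) + ((0:Nat):Int) = ((rest.length + 1 : Nat) : Int) + 2 - 1 ∨ j = 0 ∨ j = (r.toList.length : Int) + 2 - 1) _ (by intro j; omega)]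
  congr 1
  · -- middle rows
    apply List.ext_getElem
    · simp
    intro k hk1 hk2
    simp only [List.getElem_map, List.getElem_range]
    have hkn : k < rest.length + 1 := by simpa using hk1
    rw [foldl_ite_append _ (fun j => ((0:Int) + ((Nat.succ k : Nat) : Int)) = 0 ∨ (0:Int) + ((Nat.succ k : Nat) : Int) = ((rest.length + 1 : Nat) : Int) + 2 - 1 ∨ j = 0 ∨ j = (r.toList.length : Int) + 2 - 1)]
    have hidx : (0:Int) + ((Nat.succ k : Nat) : Int) - 1 = ((k : Nat) : Int) := by push_cast; omega
    rw [hidx, PySem.List.pyGet?_natCast, List.getElem?_eq_getElem (by simpa using hkn),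
      Option.getD_some]
    have hrow : r.toList.length ≤ ((r :: rest)[k]'(by simpa using hkn)).toList.length :=
      hall' _ (List.getElem_mem _)
    rw [mid_line r.toList.length _ hrow _ (by intro j h1 h2; constructor <;> intro h <;> omega)]
    -- B side: row[:w] is the w-character prefix
    simp only [PySem.Str.toList_slice, PySem.Chars.slice_eq_listSlice,
      PySem.List.slice_to_natCast]
    cases k with
    | zero => simp
    | succ k => simp
  · -- bottom bar
    rw [foldl_ite_append _ (fun j => ((0:Int) + ((rest.length + 2 : Nat) : Int)) = 0 ∨ (0:Int) + ((rest.length + 2 : Nat) : Int) = ((rest.length + 1 : Nat) : Int) + 2 - 1 ∨ j = 0 ∨ j = (r.toList.length : Int) + 2 - 1)]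
    rw [star_line r.toList.length (fun j => ((0:Int) + ((rest.length + 2 : Nat) : Int)) = 0 ∨ (0:Int) + ((rest.length + 2 : Nat) : Int) = ((rest.length + 1 : Nat) : Int) + 2 - 1 ∨ j = 0 ∨ j = (r.toList.length : Int) + 2 - 1) _ (by intro j; push_cast; omega)]

-- ===== VERDICT (by name: the statement is the Claim_ definition above) =====
theorem solution_spec : Claim_equal_solution := by
  intro picture _ hpre
  obtain ⟨hne, hall⟩ := hpre
  obtain ⟨r, rest, rfl⟩ := List.exists_cons_of_ne_nil hne
  exact main_equiv r rest hall
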